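-- pv_equiv track=rewrite | github.com/hallelaz/python-course-assignments | day04/analyze_amino_acids.py | categorize_amino_acids
-- ===== SOURCE A (Python) =====
-- AMINO_ACID_CATEGORIES = {
--     "Nonpolar (Hydrophobic)": set("GAVLIMFWP"),
--     "Polar (Uncharged)": set("STNQYC"),
--     "Positively Charged (Basic)": set("KRH"),
--     "Negatively Charged (Acidic)": set("DE"),
-- }
--
-- def categorize_amino_acids(sequence: str):
--     """
--     Takes a protein sequence (string) and returns a dictionary
--     grouping amino acids by their physicochemical category.
--     """
--     result = {
--         "Nonpolar (Hydrophobic)": [],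
--         "Polar (Uncharged)": [],
--         "Positively Charged (Basic)": [],
--         "Negatively Charged (Acidic)": [],
--         "Other / Unknown": []
--     }
--
--     for aa in sequence:
--         placed = False
--         for category, letters in AMINO_ACID_CATEGORIES.items():
--             if aa in letters:
--                 result[category].append(aa)
--                 placed = True
--                 break
--         if not placed:
--             result["Other / Unknown"].append(aa)
--
--     return result
-- ===== SOURCE B (Python) =====
-- # Flat letter->category lookup dict + pre-initialized result keys: one pass, no inner loop.
-- _CATEGORY_LETTERS = [
--     ("Nonpolar (Hydrophobic)", "GAVLIMFWP"),
--     ("Polar (Uncharged)", "STNQYC"),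
--     ("Positively Charged (Basic)", "KRH"),
--     ("Negatively Charged (Acidic)", "DE"),
-- ]
-- _OTHER = "Other / Unknown"
-- _LOOKUP = {aa: cat for cat, letters in _CATEGORY_LETTERS for aa in letters}
--
-- def categorize_amino_acids(sequence: str):
--     result = {cat: [] for cat, _ in _CATEGORY_LETTERS}
--     result[_OTHER] = []
--     for aa in sequence:
--         result[_LOOKUP.get(aa, _OTHER)].append(aa)
--     return result
-- ===== Notes on version B (the rewrite author's own statement) =====
-- stated objective: idiomatic
-- what changed: Replaces the nested per-category membership loop with break and the found-flag by a flat letter-to-category dict built once, so the body is a single dict lookup and append per character.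
import Mathlib
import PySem

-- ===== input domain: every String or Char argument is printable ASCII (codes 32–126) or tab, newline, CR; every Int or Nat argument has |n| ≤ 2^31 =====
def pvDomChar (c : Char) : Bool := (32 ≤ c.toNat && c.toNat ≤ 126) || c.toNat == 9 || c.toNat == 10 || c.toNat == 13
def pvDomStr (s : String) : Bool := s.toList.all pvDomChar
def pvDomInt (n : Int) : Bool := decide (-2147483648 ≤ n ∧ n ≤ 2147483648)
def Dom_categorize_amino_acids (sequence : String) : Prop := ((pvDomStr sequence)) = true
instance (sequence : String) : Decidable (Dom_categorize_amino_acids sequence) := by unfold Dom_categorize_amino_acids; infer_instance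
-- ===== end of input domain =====

-- B is idiomatic: a flat letter→category dict replaces A's nested category loop with break and 'placed' flag.

-- ===== PORT A =====
-- AMINO_ACID_CATEGORIES (sets written as literal char lists)
def aacCats : List (String × List Char) :=
  [("Nonpolar (Hydrophobic)", ['G','A','V','L','I','M','F','W','P']),
   ("Polar (Uncharged)", ['S','T','N','Q','Y','C']),
   ("Positively Charged (Basic)", ['K','R','H']),
   ("Negatively Charged (Acidic)", ['D','E'])]

def aacInit : PySem.Dict String (List String) :=
  PySem.Dict.ofList
    [("Nonpolar (Hydrophobic)", []), ("Polar (Uncharged)", []),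
     ("Positively Charged (Basic)", []), ("Negatively Charged (Acidic)", []),
     ("Other / Unknown", [])]

-- the inner 'for category, letters in …: if aa in letters: append; placed = True; break'
def aacInner (aa : Char) (res : PySem.Dict String (List String)) :
    List (String × List Char) → PySem.Dict String (List String) × Bool
  | [] => (res, false)
  | (cat, letters) :: rest =>
    if aa ∈ letters then (res.modify cat [] (· ++ [String.ofList [aa]]), true)
    else aacInner aa res rest

def categorize_amino_acids (sequence : String) : List (String × List String) :=
  (sequence.toList.foldl (fun res aa =>
      let pb := aacInner aa res aacCats
      if pb.2 then pb.1 else pb.1.modify "Other / Unknown" [] (· ++ [String.ofList [aa]]))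
    aacInit).items

-- ===== PORT B =====
def altCats : List (String × String) :=
  [("Nonpolar (Hydrophobic)", "GAVLIMFWP"),
   ("Polar (Uncharged)", "STNQYC"),
   ("Positively Charged (Basic)", "KRH"),
   ("Negatively Charged (Acidic)", "DE")]

-- _LOOKUP = {aa: cat for cat, letters in _CATEGORY_LETTERS for aa in letters}
def altLookup : PySem.Dict Char String :=
  altCats.foldl (fun d p => p.2.toList.foldl (fun d aa => d.insert aa p.1) d) PySem.Dict.empty

-- result = {cat: [] for cat, _ in _CATEGORY_LETTERS}; result[_OTHER] = []
def altInit : PySem.Dict String (List String) :=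
  (altCats.foldl (fun d p => d.insert p.1 []) PySem.Dict.empty).insert "Other / Unknown" []

def categorize_amino_acids_alt (sequence : String) : List (String × List String) :=
  (sequence.toList.foldl (fun res aa =>
      res.modify (altLookup.getD aa "Other / Unknown") [] (· ++ [String.ofList [aa]]))
    altInit).items

-- ===== PRECONDITION & SPEC =====
def Spec_categorize_amino_acids (sequence : String) (out : List (String × List String)) : Prop := out = categorize_amino_acids_alt sequence
instance (sequence : String) (out : List (String × List String)) : Decidable (Spec_categorize_amino_acids sequence out) := by unfold Spec_categorize_amino_acids; infer_instance

-- ===== CLAIM (what is proved, stated in full; the proofs are below) =====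
def Claim_equal_categorize_amino_acids : Prop := ∀ (sequence : String), Dom_categorize_amino_acids sequence → Spec_categorize_amino_acids sequence (categorize_amino_acids sequence)

-- ===== LEMMAS AND PROOFS =====

set_option maxRecDepth 10000

lemma altLookup_eq : altLookup = PySem.Dict.mk
      [('G', "Nonpolar (Hydrophobic)"), ('A', "Nonpolar (Hydrophobic)"), ('V', "Nonpolar (Hydrophobic)"),
       ('L', "Nonpolar (Hydrophobic)"), ('I', "Nonpolar (Hydrophobic)"), ('M', "Nonpolar (Hydrophobic)"),
       ('F', "Nonpolar (Hydrophobic)"), ('W', "Nonpolar (Hydrophobic)"), ('P', "Nonpolar (Hydrophobic)"),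
       ('S', "Polar (Uncharged)"), ('T', "Polar (Uncharged)"), ('N', "Polar (Uncharged)"),
       ('Q', "Polar (Uncharged)"), ('Y', "Polar (Uncharged)"), ('C', "Polar (Uncharged)"),
       ('K', "Positively Charged (Basic)"), ('R', "Positively Charged (Basic)"), ('H', "Positively Charged (Basic)"),
       ('D', "Negatively Charged (Acidic)"), ('E', "Negatively Charged (Acidic)")] := by decide

lemma lookup_mem1 : ∀ c ∈ (['G','A','V','L','I','M','F','W','P'] : List Char),
    altLookup.get? c = some "Nonpolar (Hydrophobic)" := by
  intro c hc
  fin_cases hc <;> rfl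

lemma lookup_mem2 : ∀ c ∈ (['S','T','N','Q','Y','C'] : List Char),
    altLookup.get? c = some "Polar (Uncharged)" := by
  intro c hc
  fin_cases hc <;> rfl

lemma lookup_mem3 : ∀ c ∈ (['K','R','H'] : List Char),
    altLookup.get? c = some "Positively Charged (Basic)" := by
  intro c hc
  fin_cases hc <;> rfl

lemma lookup_mem4 : ∀ c ∈ (['D','E'] : List Char),
    altLookup.get? c = some "Negatively Charged (Acidic)" := by
  intro c hc
  fin_cases hc <;> rfl

lemma lookup_none (c : Char)
    (h1 : c ∉ (['G','A','V','L','I','M','F','W','P'] : List Char))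
    (h2 : c ∉ (['S','T','N','Q','Y','C'] : List Char))
    (h3 : c ∉ (['K','R','H'] : List Char))
    (h4 : c ∉ (['D','E'] : List Char)) :
    altLookup.get? c = none := by
  simp only [List.mem_cons, List.not_mem_nil, or_false, not_or] at h1 h2 h3 h4
  obtain ⟨g1,g2,g3,g4,g5,g6,g7,g8,g9⟩ := h1
  obtain ⟨p1,p2,p3,p4,p5,p6⟩ := h2
  obtain ⟨k1,k2,k3⟩ := h3
  obtain ⟨d1,d2⟩ := h4
  rw [altLookup_eq]
  simp [PySem.Dict.get?, beq_iff_eq,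
    Ne.symm g1, Ne.symm g2, Ne.symm g3, Ne.symm g4, Ne.symm g5, Ne.symm g6, Ne.symm g7, Ne.symm g8, Ne.symm g9,
    Ne.symm p1, Ne.symm p2, Ne.symm p3, Ne.symm p4, Ne.symm p5, Ne.symm p6,
    Ne.symm k1, Ne.symm k2, Ne.symm k3, Ne.symm d1, Ne.symm d2]

lemma step_eq (res : PySem.Dict String (List String)) (aa : Char) :
    (let pb := aacInner aa res aacCats
     if pb.2 then pb.1 else pb.1.modify "Other / Unknown" [] (· ++ [String.ofList [aa]]))
    = res.modify (altLookup.getD aa "Other / Unknown") [] (· ++ [String.ofList [aa]]) := by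
  by_cases h1 : aa ∈ (['G','A','V','L','I','M','F','W','P'] : List Char)
  · simp [aacCats, aacInner, h1, PySem.Dict.getD_eq_get?_getD, lookup_mem1 aa h1]
  · by_cases h2 : aa ∈ (['S','T','N','Q','Y','C'] : List Char)
    · simp [aacCats, aacInner, h1, h2, PySem.Dict.getD_eq_get?_getD, lookup_mem2 aa h2]
    · by_cases h3 : aa ∈ (['K','R','H'] : List Char)
      · simp [aacCats, aacInner, h1, h2, h3, PySem.Dict.getD_eq_get?_getD, lookup_mem3 aa h3]
      · by_cases h4 : aa ∈ (['D','E'] : List Char)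
        · simp [aacCats, aacInner, h1, h2, h3, h4, PySem.Dict.getD_eq_get?_getD, lookup_mem4 aa h4]
        · simp [aacCats, aacInner, h1, h2, h3, h4, PySem.Dict.getD_eq_get?_getD,
            lookup_none aa h1 h2 h3 h4]

lemma init_eq : altInit = aacInit := by rfl

-- ===== VERDICT (by name: the statement is the Claim_ definition above) =====
theorem categorize_amino_acids_spec : Claim_equal_categorize_amino_acids := by
  intro sequence _
  unfold Spec_categorize_amino_acids categorize_amino_acids categorize_amino_acids_alt
  rw [init_eq]
  congr 1
  apply PySem.List.foldl_congr_mem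
  intro acc x _
  exact step_eq acc x
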